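-- pv_equiv track=rewrite | github.com/Sylyon/REDOCS_Netzob | Modules/multiSplitAligned.py | frequent_partial_msg
-- ===== SOURCE A (Python) =====
-- from collections import Counter
-- import copy
--
-- def frequent_partial_msg(L):
-- 	"""
-- 	frequent_partial_msg - get the frequency of beginning of the messages
-- 	return a dictionnary with the histograms for each lenth
-- 	param: list of raw messages
-- 	"""
-- 	d,r={},{} # two dict to avoid 'RuntimeError: dictionary changed size during iteration'
-- 	for l in range(2,max([len(x) for x in L])):
-- 		d[l]=dict(Counter([x[:l] for x in L if len(x)>=l]))
-- 		# get rid of unique items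
-- 		r[l]=copy.copy(d[l])
-- 		for k in d[l]:
-- 			if d[l][k]<2: r[l].pop(k)
-- 		if r[l]=={}: r.pop(l)
-- 	return r
-- ===== SOURCE B (Python) =====
-- def frequent_partial_msg(L):
--     """One pass over the messages filling a per-length prefix-count table,
--     then a read-out pass that keeps counts >= 2 (no Counter/copy/pop)."""
--     maxlen = max(len(x) for x in L)
--     table = {}
--     for x in L:
--         for l in range(2, min(len(x) + 1, maxlen)):
--             p = x[:l]
--             level = table.get(l, {})
--             level[p] = level.get(p, 0) + 1
--             table[l] = level
--     res = {}
--     for l in range(2, maxlen):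
--         flt = {k: v for k, v in table.get(l, {}).items() if v >= 2}
--         if flt:
--             res[l] = flt
--     return res
-- ===== Notes on version B (the rewrite author's own statement) =====
-- stated objective: alternative
-- what changed: A loops over lengths, rebuilding a prefix list and a Counter and copy/pop-deleting singletons per length; B makes one message-major pass filling a nested length->prefix->count table and then a read-out pass that keeps counts >= 2.
-- outside the precondition, e.g. on frequent_partial_msg([]): A raises ValueError, B raises ValueError
import Mathlib
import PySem

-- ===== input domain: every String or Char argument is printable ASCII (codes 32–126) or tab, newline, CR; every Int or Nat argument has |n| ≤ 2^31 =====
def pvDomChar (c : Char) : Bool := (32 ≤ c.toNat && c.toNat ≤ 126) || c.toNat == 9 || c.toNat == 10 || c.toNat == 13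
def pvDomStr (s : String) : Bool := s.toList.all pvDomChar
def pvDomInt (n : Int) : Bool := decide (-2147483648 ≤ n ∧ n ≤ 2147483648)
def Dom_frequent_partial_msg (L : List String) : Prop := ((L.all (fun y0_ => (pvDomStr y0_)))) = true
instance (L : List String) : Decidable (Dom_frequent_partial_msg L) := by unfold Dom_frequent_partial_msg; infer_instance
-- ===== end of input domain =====

-- B replaces A's per-length Counter/copy/pop passes by one message-major counting pass
-- plus a read-out pass (alternative decomposition; A raises on empty L, excluded by Pre_).


-- ===== PORT A =====
def frequent_partial_msg (L : List String) : List (Int × List (String × Int)) :=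
  match PySem.List.max? (L.map (fun x => (PySem.Str.len x : Int))) (fun y => y) with
  | none => []  -- Python raises ValueError here (empty L); excluded by Pre_
  | some m =>
    let r : PySem.Dict Int (PySem.Dict String Int) :=
      (PySem.List.pyRange 2 m).foldl (fun r l =>
        let dl := PySem.Dict.counter
          ((L.filter (fun x => decide ((l : Int) ≤ (PySem.Str.len x : Int)))).map
            (fun x => PySem.Str.slice x none (some l)))
        let rl := dl.keys.foldl (fun rl k => if dl.getD k 0 < 2 then rl.erase k else rl) dl
        let r' := r.insert l rl
        if rl.items = [] then r'.erase l else r') PySem.Dict.empty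
    r.items.map (fun p => (p.1, p.2.items))

-- ===== PORT B =====
def frequent_partial_msg_alt (L : List String) : List (Int × List (String × Int)) :=
  match PySem.List.max? (L.map (fun x => (PySem.Str.len x : Int))) (fun y => y) with
  | none => []  -- Python raises ValueError here (empty L); excluded by Pre_
  | some m =>
    let table : PySem.Dict Int (PySem.Dict String Int) :=
      L.foldl (fun t x =>
        (PySem.List.pyRange 2 (min ((PySem.Str.len x : Int) + 1) m)).foldl (fun t l =>
          let p := PySem.Str.slice x none (some l)
          let level := t.getD l PySem.Dict.empty
          t.insert l (level.insert p (level.getD p 0 + 1))) t) PySem.Dict.empty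
    let res : PySem.Dict Int (PySem.Dict String Int) :=
      (PySem.List.pyRange 2 m).foldl (fun res l =>
        let flt := PySem.Dict.mk
          (((table.getD l PySem.Dict.empty).items).filter (fun p => decide (2 ≤ p.2)))
        if flt.items = [] then res else res.insert l flt) PySem.Dict.empty
    res.items.map (fun p => (p.1, p.2.items))

-- ===== PRECONDITION & SPEC =====
-- Python A raises ValueError (max of an empty sequence) on L = []; that is all Pre_ excludes.
def Pre_frequent_partial_msg (L : List String) : Prop := L ≠ []
instance (L : List String) : Decidable (Pre_frequent_partial_msg L) := by
  unfold Pre_frequent_partial_msg; infer_instance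
def pvWitness_frequent_partial_msg : List String := ["abc", "abd", "abc"]

def Spec_frequent_partial_msg (L : List String) (out : List (Int × List (String × Int))) : Prop := out = frequent_partial_msg_alt L
instance (L : List String) (out : List (Int × List (String × Int))) : Decidable (Spec_frequent_partial_msg L out) := by unfold Spec_frequent_partial_msg; infer_instance

-- ===== CLAIM (what is proved, stated in full; the proofs are below) =====
def Claim_equal_frequent_partial_msg : Prop := ∀ (L : List String), Dom_frequent_partial_msg L → Pre_frequent_partial_msg L → Spec_frequent_partial_msg L (frequent_partial_msg L)

-- ===== LEMMAS AND PROOFS =====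

-- pyRange with step 1 is empty when the bounds cross
lemma pyRange_eq_nil {a b : Int} (h : b ≤ a) : PySem.List.pyRange a b = [] := by
  rw [List.eq_nil_iff_forall_not_mem]
  intro x hx
  rw [PySem.List.mem_pyRange_one] at hx
  omega

-- B's inner per-message loop, read at one level l: it touches level l exactly when l is in the range
lemma innerGetD (F : Int → PySem.Dict String Int → PySem.Dict String Int) (l : Int) :
    ∀ (n : Nat) (a b : Int), (b - a).toNat = n → ∀ (t : PySem.Dict Int (PySem.Dict String Int)),
      ((PySem.List.pyRange a b).foldl
        (fun t l' => t.insert l' (F l' (t.getD l' PySem.Dict.empty))) t).getD l PySem.Dict.empty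
      = if a ≤ l ∧ l < b then F l (t.getD l PySem.Dict.empty) else t.getD l PySem.Dict.empty := by
  intro n
  induction n with
  | zero =>
    intro a b hn t
    rw [pyRange_eq_nil (by omega)]
    simp only [List.foldl_nil]
    rw [if_neg (by omega)]
  | succ k ih =>
    intro a b hn t
    by_cases hab : a < b
    · rw [PySem.List.pyRange_one_cons hab]
      simp only [List.foldl_cons]
      rw [ih (a + 1) b (by omega)]
      by_cases hla : l = a
      · subst hla
        rw [if_neg (by omega), if_pos ⟨le_refl _, hab⟩]
        rw [PySem.Dict.getD_insert]
        simp
      · rw [PySem.Dict.getD_insert, if_neg hla]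
        by_cases hc : a + 1 ≤ l ∧ l < b
        · rw [if_pos hc, if_pos (by omega)]
        · rw [if_neg hc, if_neg (by omega)]
    · rw [pyRange_eq_nil (by omega)]
      simp only [List.foldl_nil]
      rw [if_neg (by omega)]

-- B's whole counting pass, read at one level 2 ≤ l < m: it is the per-level counting fold of A's prefix list
lemma tableLevel (m l : Int) (h2 : 2 ≤ l) (hm : l < m) :
    ∀ (L : List String) (t : PySem.Dict Int (PySem.Dict String Int)),
      ((L.foldl (fun t x =>
          (PySem.List.pyRange 2 (min ((PySem.Str.len x : Int) + 1) m)).foldl (fun t l' =>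
            t.insert l' ((t.getD l' PySem.Dict.empty).insert (PySem.Str.slice x none (some l'))
              ((t.getD l' PySem.Dict.empty).getD (PySem.Str.slice x none (some l')) 0 + 1))) t) t).getD l PySem.Dict.empty)
      = ((L.filter (fun x => decide ((l : Int) ≤ (PySem.Str.len x : Int)))).map
          (fun x => PySem.Str.slice x none (some l))).foldl
          (fun d p => d.insert p (d.getD p 0 + 1)) (t.getD l PySem.Dict.empty) := by
  intro L
  induction L with
  | nil => intro t; simp
  | cons x L ihL =>
    intro t
    simp only [List.foldl_cons, List.filter_cons]
    rw [ihL]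
    by_cases hx : (l : Int) ≤ (PySem.Str.len x : Int)
    · rw [if_pos (by simpa using hx)]
      simp only [List.map_cons, List.foldl_cons]
      congr 1
      rw [innerGetD (fun l' lv => lv.insert (PySem.Str.slice x none (some l'))
            (lv.getD (PySem.Str.slice x none (some l')) 0 + 1)) l
            (min ((PySem.Str.len x : Int) + 1) m - 2).toNat 2 _ rfl t]
      rw [if_pos (by omega)]
    · rw [if_neg (by simpa using hx)]
      congr 1
      rw [innerGetD (fun l' lv => lv.insert (PySem.Str.slice x none (some l'))
            (lv.getD (PySem.Str.slice x none (some l')) 0 + 1)) l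
            (min ((PySem.Str.len x : Int) + 1) m - 2).toNat 2 _ rfl t]
      rw [if_neg (by omega)]

-- A's delete-singletons pass over a key list is a filter on the items
lemma eraseFoldItems (P : String → Prop) [DecidablePred P] :
    ∀ (ks : List String) (r : PySem.Dict String Int),
      ((ks.foldl (fun r k => if P k then r.erase k else r) r).items)
      = r.items.filter (fun p => decide (∀ k ∈ ks, P k → p.1 ≠ k)) := by
  intro ks
  induction ks with
  | nil => intro r; simp
  | cons k ks ih =>
    intro r
    simp only [List.foldl_cons]
    by_cases hk : P k
    · rw [if_pos hk, ih]
      have he : (r.erase k).items = r.items.filter (fun p => !(p.1 == k)) := rfl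
      rw [he, List.filter_filter]
      apply List.filter_congr
      intro p _
      by_cases hpk : p.1 = k
      · simp [hpk, hk]
      · simp [hpk, hk]
    · rw [if_neg hk, ih]
      apply List.filter_congr
      intro p _
      simp only [decide_eq_decide]
      constructor
      · intro h a ha hPa
        rcases List.mem_cons.mp ha with rfl | ha'
        · exact absurd hPa hk
        · exact h a ha' hPa
      · intro h a ha hPa
        exact h a (List.mem_cons_of_mem _ ha) hPa

-- A's per-level dict (Counter then copy/pop) equals B's per-level dict (filter of the counter's items)
lemma levelEq (xs : List String) :
    ((PySem.Dict.counter xs).keys.foldl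
      (fun rl k => if (PySem.Dict.counter xs).getD k 0 < 2 then rl.erase k else rl)
      (PySem.Dict.counter xs))
    = PySem.Dict.mk ((PySem.Dict.counter xs).items.filter (fun p => decide (2 ≤ p.2))) := by
  apply PySem.Dict.ext
  rw [eraseFoldItems (fun k => (PySem.Dict.counter xs).getD k 0 < 2)]
  show _ = (PySem.Dict.counter xs).items.filter (fun p => decide (2 ≤ p.2))
  apply List.filter_congr
  intro p hp
  have hnd := PySem.Dict.nodup_keys_counter (xs := xs)
  have hp1 : (PySem.Dict.counter xs).getD p.1 0 = p.2 :=
    PySem.Dict.getD_of_mem_items _ (by simpa using hp) hnd 0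
  have hmem : p.1 ∈ (PySem.Dict.counter xs).keys :=
    PySem.Dict.mem_keys_of_mem_items _ (by simpa using hp)
  simp only [decide_eq_decide]
  constructor
  · intro h
    by_contra hlt
    exact h p.1 hmem (by omega) rfl
  · intro h a _ hPa heq
    rw [← heq, hp1] at hPa
    omega

-- the combined read-out lemma: A's insert-then-maybe-erase fold equals B's maybe-insert fold,
-- given pointwise-equal per-level dicts and all present keys below the range
lemma outerCombined (m : Int) (gA gB : Int → PySem.Dict String Int)
    (hg : ∀ l : Int, 2 ≤ l → l < m → gA l = gB l) :
    ∀ (n : Nat) (a b : Int), (b - a).toNat = n → 2 ≤ a → b ≤ m →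
    ∀ (r : PySem.Dict Int (PySem.Dict String Int)), (∀ k ∈ r.keys, k < a) →
      (PySem.List.pyRange a b).foldl (fun r l =>
        if (gA l).items = [] then (r.insert l (gA l)).erase l else r.insert l (gA l)) r
      = (PySem.List.pyRange a b).foldl (fun res l =>
          if (gB l).items = [] then res else res.insert l (gB l)) r := by
  intro n
  induction n with
  | zero =>
    intro a b hn _ _ r _
    rw [pyRange_eq_nil (by omega)]
    rfl
  | succ k ih =>
    intro a b hn h2a hbm r hkeys
    by_cases hab : a < b
    · rw [PySem.List.pyRange_one_cons hab]
      simp only [List.foldl_cons]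
      have hgab : gA a = gB a := hg a h2a (by omega)
      have hfresh : a ∉ r.keys := fun hc => absurd (hkeys a hc) (by omega)
      have hcont : r.contains a = false := by
        rw [PySem.Dict.contains_eq_decide_mem_keys]
        simpa using hfresh
      by_cases hempty : (gA a).items = []
      · rw [if_pos hempty, if_pos (hgab ▸ hempty)]
        have hrr : (r.insert a (gA a)).erase a = r := by
          apply PySem.Dict.ext
          show ((r.insert a (gA a)).items).filter (fun p => !(p.1 == a)) = r.items
          rw [PySem.Dict.items_insert_of_not_contains _ _ hcont, List.filter_append]
          have h1 : (r.items.filter (fun p => !(p.1 == a))) = r.items := by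
            apply List.filter_eq_self.mpr
            intro p hp
            have hm := PySem.Dict.mem_keys_of_mem_items _ hp
            have hne : p.1 ≠ a := fun hc => hfresh (hc ▸ hm)
            simp [hne]
          rw [h1]
          simp
        rw [hrr]
        exact ih (a + 1) b (by omega) (by omega) hbm r (fun j hj => by have := hkeys j hj; omega)
      · rw [if_neg hempty, if_neg (hgab ▸ hempty), hgab]
        apply ih (a + 1) b (by omega) (by omega) hbm
        intro j hj
        rw [PySem.Dict.keys_insert_of_not_contains _ _ hcont] at hj
        rcases List.mem_append.mp hj with h | h
        · have := hkeys j h; omega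
        · simp at h; omega
    · rw [pyRange_eq_nil (by omega)]
      rfl

-- ===== VERDICT (by name: the statement is the Claim_ definition above) =====
theorem frequent_partial_msg_spec : Claim_equal_frequent_partial_msg := by
  intro L _ _
  show frequent_partial_msg L = frequent_partial_msg_alt L
  unfold frequent_partial_msg frequent_partial_msg_alt
  cases hmax : PySem.List.max? (L.map (fun x => (PySem.Str.len x : Int))) (fun y => y) with
  | none => rfl
  | some m =>
    simp only []
    congr 2
    exact outerCombined m
      (fun l =>
        (PySem.Dict.counter
          ((L.filter (fun x => decide ((l : Int) ≤ (PySem.Str.len x : Int)))).map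
            (fun x => PySem.Str.slice x none (some l)))).keys.foldl
          (fun rl k => if (PySem.Dict.counter
            ((L.filter (fun x => decide ((l : Int) ≤ (PySem.Str.len x : Int)))).map
              (fun x => PySem.Str.slice x none (some l)))).getD k 0 < 2 then rl.erase k else rl)
          (PySem.Dict.counter
            ((L.filter (fun x => decide ((l : Int) ≤ (PySem.Str.len x : Int)))).map
              (fun x => PySem.Str.slice x none (some l)))))
      (fun l => PySem.Dict.mk
        ((((L.foldl (fun t x =>
            (PySem.List.pyRange 2 (min ((PySem.Str.len x : Int) + 1) m)).foldl (fun t l' =>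
              t.insert l' ((t.getD l' PySem.Dict.empty).insert (PySem.Str.slice x none (some l'))
                ((t.getD l' PySem.Dict.empty).getD (PySem.Str.slice x none (some l')) 0 + 1))) t)
            PySem.Dict.empty).getD l PySem.Dict.empty).items).filter (fun p => decide (2 ≤ p.2))))
      (fun l h2 hm => by
        beta_reduce
        rw [tableLevel m l h2 hm L PySem.Dict.empty, PySem.Dict.getD_empty,
          PySem.Dict.foldl_insert_getD_add_one_eq_counter]
        exact levelEq _)
      (m - 2).toNat 2 m rfl (le_refl 2) (le_refl m) PySem.Dict.empty
      (by intro j hj; simp at hj)
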